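-- pv_equiv track=rewrite | github.com/pawelofficial/poor-mans-dag | myapp/my_sf_dag/make_dummy_dag.py | print_tree_from_root
-- ===== SOURCE A (Python) =====
-- def print_tree_from_root(node, edges, indent='', is_root=True):
--     tree_str = f'{indent}{node}\n' if is_root else ''
--     children = [(edge[1], edge[2]) for edge in edges if edge[0] == node]
--     for i, (child, ref_type) in enumerate(children):
--         if i == len(children) - 1:  # last child
--             tree_str += indent + '└──>' + f'{child} ( {ref_type} ) ' + '\n'
--             tree_str += print_tree_from_root(child, edges, indent + '    ', is_root=False)
--         else:
--             tree_str += indent + '├──>' + f'{child} ( {ref_type} ) ' + '\n'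
--             tree_str += print_tree_from_root(child, edges, indent + '│   ', is_root=False)
--     return tree_str
-- ===== SOURCE B (Python) =====
-- def print_tree_from_root(node, edges, indent='', is_root=True):
--     children = {}
--     for edge in edges:
--         children.setdefault(edge[0], []).append((edge[1], edge[2]))
--     lines = [f'{indent}{node}\n'] if is_root else []
--
--     def walk(n, ind):
--         kids = children.get(n, [])
--         if not kids:
--             return
--         for child, ref_type in kids[:-1]:
--             lines.append(ind + '├──>' + child + ' ( ' + ref_type + ' ) ' + '\n')
--             walk(child, ind + '│   ')
--         child, ref_type = kids[-1]
--         lines.append(ind + '└──>' + child + ' ( ' + ref_type + ' ) ' + '\n')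
--         walk(child, ind + '    ')
--
--     walk(node, indent)
--     return ''.join(lines)
-- ===== Notes on version B (the rewrite author's own statement) =====
-- stated objective: faster
-- what changed: B builds a children adjacency dict in one pass over the edges so each visited node's children are an O(1) lookup instead of A's per-node scan of the whole edge list, and collects the output lines in a list joined once instead of A's repeated string concatenation; the per-node loop is decomposed as kids[:-1] plus kids[-1] instead of enumerate with a last-index test.
import Mathlib
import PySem

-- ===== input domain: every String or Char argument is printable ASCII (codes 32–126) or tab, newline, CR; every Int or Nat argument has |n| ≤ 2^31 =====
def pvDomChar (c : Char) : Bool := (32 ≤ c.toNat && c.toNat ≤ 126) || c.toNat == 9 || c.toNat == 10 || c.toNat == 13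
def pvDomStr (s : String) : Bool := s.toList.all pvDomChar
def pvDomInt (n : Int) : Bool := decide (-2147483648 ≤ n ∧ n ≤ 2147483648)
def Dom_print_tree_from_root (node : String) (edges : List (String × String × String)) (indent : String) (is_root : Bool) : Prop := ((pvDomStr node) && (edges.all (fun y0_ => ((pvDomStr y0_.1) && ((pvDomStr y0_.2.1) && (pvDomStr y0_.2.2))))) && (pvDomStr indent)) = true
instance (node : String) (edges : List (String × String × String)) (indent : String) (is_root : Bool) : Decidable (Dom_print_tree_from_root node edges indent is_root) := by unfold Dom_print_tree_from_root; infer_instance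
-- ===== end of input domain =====

-- B replaces A's per-node O(|edges|) child scan by a children map built once and appends lines to a
-- list joined once instead of concatenating strings level by level (objective: faster child lookup).

-- ===== PORT A =====
-- children = [(edge[1], edge[2]) for edge in edges if edge[0] == node]
def pvChildrenA (edges : List (String × String × String)) (node : String) : List (String × String) :=
  (edges.filter (fun e => e.1 == node)).map (fun e => (e.2.1, e.2.2))

-- The Python recursion diverges on a cycle reachable from `node`; the port carries a fuel argument
-- (recursion depth bound, edges.length + 1 suffices on every input admitted by Pre_ below).
mutual
def pvGoA (edges : List (String × String × String)) : Nat → String → String → Bool → String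
  | 0, _, _, _ => ""
  | fuel+1, node, indent, is_root =>
    let tree_str := if is_root then indent ++ node ++ "\n" else ""
    let children := pvChildrenA edges node
    pvLoopA edges fuel indent (children.length : Int) (PySem.List.enumerate children 0) tree_str
def pvLoopA (edges : List (String × String × String)) : Nat → String → Int → List (Int × String × String) → String → String
  | _, _, _, [], acc => acc
  | fuel, indent, len, (i, child, rt) :: rest, acc =>
    if i == len - 1 then
      pvLoopA edges fuel indent len rest
        (acc ++ (indent ++ "└──>" ++ (child ++ " ( " ++ rt ++ " ) ") ++ "\n")
             ++ pvGoA edges fuel child (indent ++ "    ") false)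
    else
      pvLoopA edges fuel indent len rest
        (acc ++ (indent ++ "├──>" ++ (child ++ " ( " ++ rt ++ " ) ") ++ "\n")
             ++ pvGoA edges fuel child (indent ++ "│   ") false)
end

def print_tree_from_root (node : String) (edges : List (String × String × String)) (indent : String) (is_root : Bool) : String :=
  pvGoA edges (edges.length + 1) node indent is_root

-- ===== PORT B =====
-- children.setdefault(edge[0], []).append((edge[1], edge[2]))
def pvChildMap (edges : List (String × String × String)) : PySem.Dict String (List (String × String)) :=
  edges.foldl (fun d p => d.modify p.1 [] (· ++ [p.2])) PySem.Dict.empty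

-- walk(n, ind): the 'if not kids: return' / kids[:-1] loop / kids[-1] tail of Source B
-- (kids[-1] is read off with getLast?, whose none case is exactly 'not kids'); same fuel guard as A's port.
mutual
def pvWalkB (cm : PySem.Dict String (List (String × String))) : Nat → String → String → List String
  | 0, _, _ => []
  | fuel+1, n, ind =>
    let kids := cm.getD n []
    match kids.getLast? with
    | none => []
    | some (c, t) =>
        pvMidB cm fuel ind kids.dropLast
          ++ ((ind ++ "└──>" ++ c ++ " ( " ++ t ++ " ) " ++ "\n")
              :: pvWalkB cm fuel c (ind ++ "    "))
def pvMidB (cm : PySem.Dict String (List (String × String))) : Nat → String → List (String × String) → List String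
  | _, _, [] => []
  | fuel, ind, (c, t) :: rest =>
      (ind ++ "├──>" ++ c ++ " ( " ++ t ++ " ) " ++ "\n")
        :: (pvWalkB cm fuel c (ind ++ "│   ") ++ pvMidB cm fuel ind rest)
end

-- ''.join(lines)
def pvJoin : List String → String
  | [] => ""
  | s :: rest => s ++ pvJoin rest

def print_tree_from_root_alt (node : String) (edges : List (String × String × String)) (indent : String) (is_root : Bool) : String :=
  let cm := pvChildMap edges
  pvJoin ((if is_root then [indent ++ node ++ "\n"] else []) ++ pvWalkB cm (edges.length + 1) node indent)

-- ===== PRECONDITION & SPEC =====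
-- successors of n and the set of nodes reachable from n (edges.length expansion rounds reach every node)
def pvSucc (edges : List (String × String × String)) (n : String) : List String :=
  (edges.filter (fun e => e.1 == n)).map (·.2.1)
def pvReach (edges : List (String × String × String)) (n : String) : List String :=
  (fun s => PySem.Set.update s (s.flatMap (pvSucc edges)))^[edges.length + 1] [n]

-- Pre_ excludes exactly the inputs with a cycle reachable from `node`, on which the Python A
-- (and B) recurses forever (RecursionError) and returns nothing.
def Pre_print_tree_from_root (node : String) (edges : List (String × String × String)) (indent : String) (is_root : Bool) : Prop :=
  ∀ e ∈ edges, e.1 ∈ pvReach edges node → e.1 ∉ pvReach edges e.2.1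
instance (node : String) (edges : List (String × String × String)) (indent : String) (is_root : Bool) : Decidable (Pre_print_tree_from_root node edges indent is_root) := by unfold Pre_print_tree_from_root; infer_instance

def pvWitness_print_tree_from_root : String × (List (String × String × String)) × String × Bool :=
  ("a", [("a", "b", "fk"), ("a", "c", "ref"), ("b", "d", "fk")], "", true)

def Spec_print_tree_from_root (node : String) (edges : List (String × String × String)) (indent : String) (is_root : Bool) (out : String) : Prop := out = print_tree_from_root_alt node edges indent is_root
instance (node : String) (edges : List (String × String × String)) (indent : String) (is_root : Bool) (out : String) : Decidable (Spec_print_tree_from_root node edges indent is_root out) := by unfold Spec_print_tree_from_root; infer_instance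

-- ===== CLAIM (what is proved, stated in full; the proofs are below) =====
def Claim_equal_print_tree_from_root : Prop := ∀ (node : String) (edges : List (String × String × String)) (indent : String) (is_root : Bool), Dom_print_tree_from_root node edges indent is_root → Pre_print_tree_from_root node edges indent is_root → Spec_print_tree_from_root node edges indent is_root (print_tree_from_root node edges indent is_root)

-- ===== LEMMAS AND PROOFS =====

set_option maxHeartbeats 1000000

-- common reference shape of the output, structural recursion on fuel/children
mutual
def pvR (edges : List (String × String × String)) : Nat → String → String → String
  | 0, _, _ => ""
  | fuel+1, n, ind => pvRL edges fuel ind (pvChildrenA edges n)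
def pvRL (edges : List (String × String × String)) : Nat → String → List (String × String) → String
  | _, _, [] => ""
  | fuel, ind, [(c, t)] =>
      ind ++ "└──>" ++ (c ++ " ( " ++ t ++ " ) ") ++ "\n" ++ pvR edges fuel c (ind ++ "    ")
  | fuel, ind, (c, t) :: rest =>
      ind ++ "├──>" ++ (c ++ " ( " ++ t ++ " ) ") ++ "\n" ++ pvR edges fuel c (ind ++ "│   ")
        ++ pvRL edges fuel ind rest
end

theorem pvRL_nil (edges : List (String × String × String)) (fuel : Nat) (ind : String) :
    pvRL edges fuel ind [] = "" := by simp [pvRL]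

theorem pvRL_single (edges : List (String × String × String)) (fuel : Nat) (ind : String) (c t : String) :
    pvRL edges fuel ind [(c, t)] =
      ind ++ "└──>" ++ (c ++ " ( " ++ t ++ " ) ") ++ "\n" ++ pvR edges fuel c (ind ++ "    ") := by
  simp [pvRL]

theorem pvRL_cons₂ (edges : List (String × String × String)) (fuel : Nat) (ind : String) (c t : String)
    (p : String × String) (rest : List (String × String)) :
    pvRL edges fuel ind ((c, t) :: p :: rest) =
      ind ++ "├──>" ++ (c ++ " ( " ++ t ++ " ) ") ++ "\n" ++ pvR edges fuel c (ind ++ "│   ")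
        ++ pvRL edges fuel ind (p :: rest) := by
  simp [pvRL]

theorem pvJoin_append (a b : List String) : pvJoin (a ++ b) = pvJoin a ++ pvJoin b := by
  induction a with
  | nil => simp [pvJoin]
  | cons s rest ih => simp [pvJoin, ih, String.append_assoc]

-- A side: the enumerate loop equals pvRL
theorem loopA_eq (edges : List (String × String × String)) (fuel : Nat)
    (IH : ∀ n ind, pvGoA edges fuel n ind false = pvR edges fuel n ind) :
    ∀ (l : List (String × String)) (s len : Int) (ind acc : String),
      s + l.length = len →
      pvLoopA edges fuel ind len (PySem.List.enumerate l s) acc = acc ++ pvRL edges fuel ind l := by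
  intro l
  induction l with
  | nil => intro s len ind acc _; simp [PySem.List.enumerate_nil, pvLoopA, pvRL_nil]
  | cons hd tl ih =>
      intro s len ind acc hlen
      obtain ⟨c, t⟩ := hd
      rw [PySem.List.enumerate_cons]
      cases tl with
      | nil =>
          simp only [pvLoopA, PySem.List.enumerate_nil]
          split
          · rw [pvRL_single, IH]
            simp [String.append_assoc]
          · rename_i h
            exfalso
            simp only [List.length_cons, List.length_nil] at hlen
            simp only [beq_iff_eq] at h
            omega
      | cons p rest =>
          simp only [pvLoopA]
          split
          · rename_i h
            exfalso
            simp only [List.length_cons] at hlen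
            simp only [beq_iff_eq] at h
            omega
          · rw [ih (s + 1) len ind _ (by simp only [List.length_cons] at hlen ⊢; push_cast at hlen ⊢; omega)]
            rw [pvRL_cons₂, IH]
            simp [String.append_assoc]

theorem goA_eq (edges : List (String × String × String)) :
    ∀ (fuel : Nat) (n ind : String), pvGoA edges fuel n ind false = pvR edges fuel n ind := by
  intro fuel
  induction fuel with
  | zero => intro n ind; simp [pvGoA, pvR]
  | succ fuel ih =>
      intro n ind
      simp only [pvGoA, Bool.false_eq_true, if_false]
      rw [loopA_eq edges fuel ih (pvChildrenA edges n) 0 _ ind "" (by simp)]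
      simp [pvR]

theorem goA_eq_root (edges : List (String × String × String)) (fuel : Nat) (n ind : String) :
    pvGoA edges (fuel + 1) n ind true = (ind ++ n ++ "\n") ++ pvR edges (fuel + 1) n ind := by
  simp only [pvGoA, if_true]
  rw [loopA_eq edges fuel (fun n ind => goA_eq edges fuel n ind) (pvChildrenA edges n) 0 _ ind _ (by simp)]
  simp [pvR]

-- B side: the children map looks up exactly A's child list
theorem childMap_getD (edges : List (String × String × String)) (n : String) :
    (pvChildMap edges).getD n [] = pvChildrenA edges n := by
  unfold pvChildMap pvChildrenA
  rw [PySem.Dict.getD_foldl_modify_append]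
  simp [PySem.Dict.getD_empty]

theorem midB_eq (edges : List (String × String × String)) (fuel : Nat)
    (ih : ∀ n ind, pvJoin (pvWalkB (pvChildMap edges) fuel n ind) = pvR edges fuel n ind) :
    ∀ (l : List (String × String)) (ind c t : String),
      pvJoin (pvMidB (pvChildMap edges) fuel ind l
        ++ ((ind ++ "└──>" ++ c ++ " ( " ++ t ++ " ) " ++ "\n")
            :: pvWalkB (pvChildMap edges) fuel c (ind ++ "    ")))
      = pvRL edges fuel ind (l ++ [(c, t)]) := by
  intro l
  induction l with
  | nil =>
      intro ind c t
      simp only [pvMidB, List.nil_append, pvJoin, pvRL_single, ih]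
      simp [String.append_assoc]
  | cons p tl ihl =>
      intro ind c t
      obtain ⟨c', t'⟩ := p
      cases tl with
      | nil =>
          simp only [pvMidB, List.cons_append, List.nil_append, pvJoin, pvJoin_append, ih]
          rw [pvRL_cons₂, pvRL_single]
          simp [String.append_assoc]
      | cons q r =>
          have h2 := ihl ind c t
          simp only [pvJoin_append, pvJoin, pvMidB, List.cons_append, List.append_assoc, ih] at h2 ⊢
          rw [pvRL_cons₂, ← h2]
          simp [String.append_assoc]

theorem walkB_eq (edges : List (String × String × String)) :
    ∀ (fuel : Nat) (n ind : String),
      pvJoin (pvWalkB (pvChildMap edges) fuel n ind) = pvR edges fuel n ind := by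
  intro fuel
  induction fuel with
  | zero => intro n ind; simp [pvWalkB, pvR, pvJoin]
  | succ fuel ih =>
      intro n ind
      simp only [pvWalkB, pvR, childMap_getD]
      generalize pvChildrenA edges n = kids
      split
      · rename_i h
        rw [List.getLast?_eq_none_iff.mp h]
        simp [pvRL_nil, pvJoin]
      · rename_i c t h
        obtain ⟨l, rfl⟩ := List.getLast?_eq_some_iff.mp h
        rw [List.dropLast_concat]
        exact midB_eq edges fuel ih l ind c t

-- ===== VERDICT (by name: the statement is the Claim_ definition above) =====
theorem print_tree_from_root_spec : Claim_equal_print_tree_from_root := by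
  intro node edges indent is_root _ _
  unfold Spec_print_tree_from_root print_tree_from_root print_tree_from_root_alt
  cases is_root with
  | false =>
      simp only [Bool.false_eq_true, if_false, List.nil_append]
      rw [goA_eq edges, ← walkB_eq edges]
  | true =>
      rw [goA_eq_root, ← walkB_eq edges]
      simp [pvJoin, String.append_assoc]
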